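-- pv_equiv track=rewrite | github.com/chulsea/TIL | algorithm/Python/algorithm/swexport/d3/distance_maze.py | __dfs
-- ===== SOURCE A (Python) =====
-- dx = [0, 0, -1, 1]
--
-- dy = [-1, 1, 0, 0]
--
-- def __dfs(maze, visited, y, x):
--     visited[y][x] = True
--     n = len(maze)
--     if maze[y][x] == 3:
--         return 1
--     for i in range(4):
--         ny = y + dy[i]
--         nx = x + dx[i]
--         if 0 <= ny < n and 0 <= nx < n and \
--                 not visited[ny][nx] and maze[ny][nx] != 1:
--             result = __dfs(maze, visited, ny, nx)
--             if result:
--                 return result + 1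
-- ===== SOURCE B (Python) =====
-- # Iterative DFS with an explicit stack of (y, x, depth) entries instead of recursion;
-- # same return value; visited is mutated similarly (equivalence claimed for the return value only).
-- dx = [0, 0, -1, 1]
--
-- dy = [-1, 1, 0, 0]
--
--
-- def __neighbors(maze, visited, n, y, x, d):
--     out = []
--     for i in range(4):
--         ny, nx = y + dy[i], x + dx[i]
--         if 0 <= ny < n and 0 <= nx < n and not visited[ny][nx] and maze[ny][nx] != 1:
--             out.append((ny, nx, d))
--     return out
--
--
-- def __dfs(maze, visited, y, x):
--     n = len(maze)
--     visited[y][x] = True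
--     if maze[y][x] == 3:
--         return 1
--     stack = __neighbors(maze, visited, n, y, x, 2)
--     stack.reverse()
--     while stack:
--         cy, cx, d = stack.pop()
--         if visited[cy][cx]:
--             continue
--         visited[cy][cx] = True
--         if maze[cy][cx] == 3:
--             return d
--         stack.extend(reversed(__neighbors(maze, visited, n, cy, cx, d + 1)))
--     return None
-- ===== Notes on version B (the rewrite author's own statement) =====
-- stated objective: alternative
-- what changed: The recursive depth-first search (call stack, depth added on return) is re-implemented as an iterative loop over an explicit stack of (y, x, depth) entries, marking cells visited on pop and pushing push-time-filtered neighbours so the traversal order and returned depth are identical.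
-- outside the precondition, e.g. on __dfs([[3]], [[False], [False]], 0, 0): A returns 1, B returns 1; on __dfs([[3]], [[False, False]], 0, 0): A returns 1, B returns 1
import Mathlib
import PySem

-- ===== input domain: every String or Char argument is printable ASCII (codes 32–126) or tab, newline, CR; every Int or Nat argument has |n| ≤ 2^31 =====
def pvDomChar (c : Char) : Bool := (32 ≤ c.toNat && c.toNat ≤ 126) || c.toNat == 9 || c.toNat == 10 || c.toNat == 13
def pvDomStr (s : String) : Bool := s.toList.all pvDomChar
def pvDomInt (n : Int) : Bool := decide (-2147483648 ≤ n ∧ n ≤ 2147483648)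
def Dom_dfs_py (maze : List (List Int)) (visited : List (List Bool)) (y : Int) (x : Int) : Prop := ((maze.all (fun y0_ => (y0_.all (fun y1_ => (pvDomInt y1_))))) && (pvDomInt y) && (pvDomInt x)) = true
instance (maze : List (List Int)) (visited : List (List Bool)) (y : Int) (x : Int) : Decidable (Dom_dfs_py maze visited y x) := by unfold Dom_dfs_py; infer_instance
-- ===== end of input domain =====

-- B re-implements the recursive DFS as an iterative DFS over an explicit stack of (y, x, depth)
-- entries (alternative decomposition, same cost); equivalence is claimed for the RETURN VALUE only
-- (both Pythons mutate `visited` in place).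

-- ===== PORT A =====
-- module constants dx, dy
def pyDx : List Int := [0, 0, -1, 1]
def pyDy : List Int := [-1, 1, 0, 0]
-- maze[y][x] (exact under Pre_, where every such read is in range)
def getI2 (m : List (List Int)) (y x : Int) : Int :=
  PySem.List.pyGetD (PySem.List.pyGetD m y []) x 0
-- visited[y][x]
def getB2 (v : List (List Bool)) (y x : Int) : Bool :=
  PySem.List.pyGetD (PySem.List.pyGetD v y []) x false
-- visited[y][x] = True  (exact under Pre_, where y and x are in range)
def setT (v : List (List Bool)) (y x : Int) : List (List Bool) :=
  PySem.List.pySetD v y (PySem.List.pySetD (PySem.List.pyGetD v y []) x true)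
-- number of False cells: used only to pick a sufficient fuel for the recursion
def cfV (v : List (List Bool)) : Nat := (v.map (List.count false)).sum

-- literal port of A's recursion; `fuel` only makes the recursion total (never exhausted under Pre_),
-- the mutated `visited` is threaded as part of the result
mutual
def dfsA (maze : List (List Int)) : Nat → List (List Bool) → Int → Int → Option Int × List (List Bool)
  | 0, v, _, _ => (none, v)
  | fuel+1, v, y, x =>
    let v1 := setT v y x
    let n : Int := maze.length
    if getI2 maze y x = 3 then (some 1, v1)
    else dfsAloop maze fuel n v1 y x (List.range 4)
  termination_by fuel _ _ _ => (fuel, 0)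
-- the `for i in range(4)` loop with its early return
def dfsAloop (maze : List (List Int)) : Nat → Int → List (List Bool) → Int → Int → List Nat → Option Int × List (List Bool)
  | _, _, v, _, _, [] => (none, v)
  | fuel, n, v, y, x, i :: rest =>
    let ny := y + PySem.List.pyGetD pyDy (i : Int) 0
    let nx := x + PySem.List.pyGetD pyDx (i : Int) 0
    if 0 ≤ ny ∧ ny < n ∧ 0 ≤ nx ∧ nx < n ∧ getB2 v ny nx = false ∧ getI2 maze ny nx ≠ 1 then
      match dfsA maze fuel v ny nx with
      | (some r, v') => if r ≠ 0 then (some (r + 1), v') else dfsAloop maze fuel n v' y x rest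
      | (none, v') => dfsAloop maze fuel n v' y x rest
    else dfsAloop maze fuel n v y x rest
  termination_by fuel _ _ _ _ is => (fuel, is.length + 1)
end

def dfs_py (maze : List (List Int)) (visited : List (List Bool)) (y : Int) (x : Int) : Option Int :=
  (dfsA maze (cfV visited + 2) visited y x).1

-- ===== PORT B =====
-- __neighbors: the valid unvisited neighbours of (y, x), with depth d, in direction order i = 0..3
def nbrsB (maze : List (List Int)) (v : List (List Bool)) (n : Int) (y x d : Int) :
    List (Int × Int × Int) :=
  (List.range 4).filterMap (fun (i : Nat) =>
    let ny := y + PySem.List.pyGetD pyDy (i : Int) 0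
    let nx := x + PySem.List.pyGetD pyDx (i : Int) 0
    if 0 ≤ ny ∧ ny < n ∧ 0 ≤ nx ∧ nx < n ∧ getB2 v ny nx = false ∧ getI2 maze ny nx ≠ 1 then
      some (ny, nx, d)
    else none)

-- the while loop; the stack is modelled TOP-AT-HEAD (Python pops from the end of a reversed list,
-- so `stack.reverse(); …; stack.extend(reversed(nbrs))` becomes prepending `nbrs`);
-- `fuel` only makes the loop total (never exhausted under Pre_)
def loopB (maze : List (List Int)) : Nat → List (List Bool) → List (Int × Int × Int) → Option Int
  | _, _, [] => none
  | 0, _, _ :: _ => none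
  | fuel+1, v, (cy, cx, d) :: rest =>
    if getB2 v cy cx = true then loopB maze fuel v rest
    else
      let v1 := setT v cy cx
      if getI2 maze cy cx = 3 then some d
      else loopB maze fuel v1 (nbrsB maze v1 (maze.length : Int) cy cx (d + 1) ++ rest)

def dfs_py_alt (maze : List (List Int)) (visited : List (List Bool)) (y : Int) (x : Int) : Option Int :=
  let n : Int := maze.length
  let v1 := setT visited y x
  if getI2 maze y x = 3 then some 1
  else loopB maze (4 * cfV visited + 5) v1 (nbrsB maze v1 n y x 2)

-- ===== PRECONDITION & SPEC =====
-- Pre_ restricts to the natural domain of the search: a square n×n maze with a visited grid of the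
-- same shape and a start index Python accepts; outside it A raises IndexError on ragged/mismatched
-- grids reached by the search or on an out-of-range start (A happens to return on a few such
-- malformed grids whose extra cells the search never touches — see the cites).
def Pre_dfs_py (maze : List (List Int)) (visited : List (List Bool)) (y : Int) (x : Int) : Prop :=
  visited.length = maze.length ∧
  (∀ r ∈ maze, r.length = maze.length) ∧
  (∀ r ∈ visited, r.length = maze.length) ∧
  -(maze.length : Int) ≤ y ∧ y < (maze.length : Int) ∧
  -(maze.length : Int) ≤ x ∧ x < (maze.length : Int)
instance (maze : List (List Int)) (visited : List (List Bool)) (y : Int) (x : Int) : Decidable (Pre_dfs_py maze visited y x) := by unfold Pre_dfs_py; infer_instance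
def pvWitness_dfs_py : List (List Int) × List (List Bool) × Int × Int :=
  ([[0, 0], [1, 3]], [[false, false], [false, false]], 0, 0)
def Spec_dfs_py (maze : List (List Int)) (visited : List (List Bool)) (y : Int) (x : Int) (out : Option Int) : Prop := out = dfs_py_alt maze visited y x
instance (maze : List (List Int)) (visited : List (List Bool)) (y : Int) (x : Int) (out : Option Int) : Decidable (Spec_dfs_py maze visited y x out) := by unfold Spec_dfs_py; infer_instance

-- ===== CLAIM (what is proved, stated in full; the proofs are below) =====
def Claim_equal_dfs_py : Prop := ∀ (maze : List (List Int)) (visited : List (List Bool)) (y : Int) (x : Int), Dom_dfs_py maze visited y x → Pre_dfs_py maze visited y x → Spec_dfs_py maze visited y x (dfs_py maze visited y x)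

-- ===== LEMMAS AND PROOFS =====

def RL (v : List (List Bool)) (N : Nat) : Prop := v.length = N ∧ ∀ r ∈ v, r.length = N

theorem pyIdx_lt {n : Nat} {i : Int} {k : Nat} (h : PySem.List.pyIdx? n i = some k) :
    k < n := by
  unfold PySem.List.pyIdx? at h
  split_ifs at h <;> simp_all <;> omega

theorem pyGetD_row (v : List (List Bool)) (a : Int) :
    PySem.List.pyGetD v a [] =
      ((PySem.List.pyIdx? v.length a).map (fun k => v.getD k [])).getD [] := by
  unfold PySem.List.pyGetD PySem.List.pyGet?
  rcases h : PySem.List.pyIdx? v.length a with _ | k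
  · simp [h]
  · have hk := pyIdx_lt h
    simp [h, List.getD, List.getElem?_eq_getElem hk]

theorem pyGetD_cell (l : List Bool) (b : Int) :
    PySem.List.pyGetD l b false =
      ((PySem.List.pyIdx? l.length b).map (fun j => l.getD j false)).getD false := by
  unfold PySem.List.pyGetD PySem.List.pyGet?
  rcases h : PySem.List.pyIdx? l.length b with _ | j
  · simp [h]
  · have hj := pyIdx_lt h
    simp [h, List.getD, List.getElem?_eq_getElem hj]

theorem count_set_true_le (l : List Bool) (j : Nat) :
    (l.set j true).count false ≤ l.count false := by
  induction l generalizing j with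
  | nil => simp
  | cons a t ih =>
    cases j with
    | zero => cases a <;> simp [List.count_cons]
    | succ j => simp [List.count_cons]; exact ih j

theorem count_set_true_dec (l : List Bool) (j : Nat) (hj : j < l.length)
    (hv : l.getD j false = false) : (l.set j true).count false + 1 = l.count false := by
  induction l generalizing j with
  | nil => simp at hj
  | cons a t ih =>
    cases j with
    | zero => simp_all [List.count_cons]
    | succ j =>
      simp at hj hv
      simp [List.count_cons, ← ih j hj (by simpa [List.getD, List.getElem?_eq_getElem hj] using hv)]
      omega

theorem cfV_set (v : List (List Bool)) (k : Nat) (r' : List Bool) (hk : k < v.length) :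
    cfV (v.set k r') + ((v.getD k []).count false) = cfV v + r'.count false := by
  induction v generalizing k with
  | nil => simp at hk
  | cons a t ih =>
    cases k with
    | zero => simp [cfV]; omega
    | succ k =>
      simp at hk
      have := ih k hk
      simp [cfV] at this ⊢
      omega

theorem set_getD_self' (v : List (List Bool)) (k : Nat) : v.set k (v.getD k []) = v := by
  induction v generalizing k with
  | nil => simp
  | cons a t ih =>
    cases k with
    | zero => simp
    | succ k => simpa [List.getD] using congrArg (List.cons a) (ih k)

theorem setT_master (v : List (List Bool)) (y x : Int) :
    setT v y x = v ∨
    ∃ k j, k < v.length ∧ setT v y x = v.set k ((v.getD k []).set j true) := by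
  unfold setT
  rcases hidx : PySem.List.pyIdx? v.length y with _ | k
  · left; simp [PySem.List.pySetD, PySem.List.pySet?, hidx]
  · have hk := pyIdx_lt hidx
    have hrow : PySem.List.pyGetD v y [] = v.getD k [] := by
      rw [pyGetD_row, hidx]; rfl
    rcases hx : PySem.List.pyIdx? (v.getD k []).length x with _ | j
    · left
      rw [hrow]
      simp only [PySem.List.pySetD, PySem.List.pySet?, hidx, hx, Option.map_some,
        Option.map_none, Option.getD_some, Option.getD_none]
      exact set_getD_self' v k
    · right
      refine ⟨k, j, hk, ?_⟩
      rw [hrow]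
      simp only [PySem.List.pySetD, PySem.List.pySet?, hidx, hx, Option.map_some,
        Option.getD_some]

theorem getD_set_gen {α : Type} (v : List α) (k : Nat) (w : α) (i : Nat) (d : α) :
    (v.set k w).getD i d = if i = k ∧ k < v.length then w else v.getD i d := by
  induction v generalizing k i with
  | nil => simp
  | cons a t ih =>
    cases k with
    | zero => cases i <;> simp
    | succ k =>
      cases i with
      | zero => simp
      | succ i => simpa [List.getD] using ih k i

theorem getD_mem {α : Type} (v : List α) (k : Nat) (d : α) (hk : k < v.length) :
    v.getD k d ∈ v := by
  induction v generalizing k with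
  | nil => simp at hk
  | cons a t ih =>
    cases k with
    | zero => simp
    | succ k => simp at hk; simpa [List.getD] using Or.inr (by simpa [List.getD] using ih k hk)

theorem mem_set_cases {α : Type} {v : List α} {k : Nat} {w : α} {r : α} (h : r ∈ v.set k w) :
    r ∈ v ∨ r = w := by
  induction v generalizing k with
  | nil => simp at h
  | cons a t ih =>
    cases k with
    | zero =>
      rcases List.mem_cons.mp h with h' | h'
      · right; exact h'
      · left; exact List.mem_cons_of_mem a h'
    | succ k =>
      rcases List.mem_cons.mp h with h' | h'
      · left; simp [h']
      · rcases ih h' with h'' | h''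
        · left; exact List.mem_cons_of_mem a h''
        · right; exact h''

theorem RL_setT {v : List (List Bool)} {N : Nat} (h : RL v N) (y x : Int) :
    RL (setT v y x) N := by
  rcases setT_master v y x with hm | ⟨k, j, hk, hm⟩
  · rwa [hm]
  · rw [hm]
    refine ⟨by simpa using h.1, fun r hr => ?_⟩
    rcases mem_set_cases hr with h' | h'
    · exact h.2 r h'
    · rw [h']
      simpa using h.2 _ (getD_mem v k [] hk)

theorem cf_setT_le (v : List (List Bool)) (y x : Int) : cfV (setT v y x) ≤ cfV v := by
  rcases setT_master v y x with hm | ⟨k, j, hk, hm⟩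
  · rw [hm]
  · rw [hm]
    have h1 := cfV_set v k ((v.getD k []).set j true) hk
    have h2 := count_set_true_le (v.getD k []) j
    omega

theorem mono_setT (v : List (List Bool)) (y x a b : Int) (h : getB2 v a b = true) :
    getB2 (setT v y x) a b = true := by
  rcases setT_master v y x with hm | ⟨k, j, hk, hm⟩
  · rwa [hm]
  · rw [hm]
    unfold getB2 at h ⊢
    rw [pyGetD_row] at h ⊢
    simp only [List.length_set]
    rcases hka : PySem.List.pyIdx? v.length a with _ | ka
    · rw [hka] at h; simp [PySem.List.pyGetD, PySem.List.pyGet?, PySem.List.pyIdx?] at h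
    · simp only [hka] at h ⊢
      simp only [Option.map_some, Option.getD_some] at h ⊢
      rw [getD_set_gen]
      by_cases hkk : ka = k ∧ k < v.length
      · simp only [if_pos hkk]
        rw [pyGetD_cell] at h ⊢
        simp only [List.length_set]
        rw [hkk.1] at h
        rcases hjb : PySem.List.pyIdx? (v.getD k []).length b with _ | jb
        · rw [hjb] at h; exact absurd h (by simp)
        · simp only [hjb] at h ⊢
          simp only [Option.map_some, Option.getD_some] at h ⊢
          rw [getD_set_gen]
          by_cases hjj : jb = j ∧ j < (v.getD k []).length
          · rw [if_pos hjj]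
          · rw [if_neg hjj]; exact h
      · rw [if_neg hkk]
        rw [pyGetD_cell] at h ⊢
        exact h

theorem cf_setT_dec {v : List (List Bool)} {N : Nat} (h : RL v N) {y x : Int}
    (hy0 : 0 ≤ y) (hy1 : y < (N : Int)) (hx0 : 0 ≤ x) (hx1 : x < (N : Int))
    (hf : getB2 v y x = false) : cfV (setT v y x) + 1 = cfV v := by
  have hlen : v.length = N := h.1
  have hNy : PySem.List.pyIdx? v.length y = some y.toNat := by
    unfold PySem.List.pyIdx?
    rw [if_pos hy0, if_pos (by omega : y < (v.length : Int))]
  have hky : y.toNat < v.length := by omega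
  have hrowmem := getD_mem v y.toNat [] hky
  have hrowlen : (v.getD y.toNat []).length = N := h.2 _ hrowmem
  have hNx : PySem.List.pyIdx? (v.getD y.toNat []).length x = some x.toNat := by
    unfold PySem.List.pyIdx?
    rw [if_pos hx0, if_pos (by omega : x < ((v.getD y.toNat []).length : Int))]
  have hst : setT v y x = v.set y.toNat ((v.getD y.toNat []).set x.toNat true) := by
    unfold setT
    have hrow : PySem.List.pyGetD v y [] = v.getD y.toNat [] := by rw [pyGetD_row, hNy]; rfl
    rw [hrow]
    simp only [PySem.List.pySetD, PySem.List.pySet?, hNy, hNx, Option.map_some, Option.getD_some]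
  have hcell : (v.getD y.toNat []).getD x.toNat false = false := by
    unfold getB2 at hf
    rw [pyGetD_row, hNy] at hf
    simp only [Option.map_some, Option.getD_some] at hf
    rw [pyGetD_cell, hNx] at hf
    simpa using hf
  have h1 := cfV_set v y.toNat ((v.getD y.toNat []).set x.toNat true) hky
  have h2 := count_set_true_dec (v.getD y.toNat []) x.toNat (by omega) hcell
  rw [hst]
  omega


def MonoV (v w : List (List Bool)) : Prop := ∀ a b : Int, getB2 v a b = true → getB2 w a b = true

def PostA (v w : List (List Bool)) : Prop :=
  (∀ N, RL v N → RL w N) ∧ cfV w ≤ cfV v ∧ MonoV v w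

theorem PostA_refl (v : List (List Bool)) : PostA v v :=
  ⟨fun _ h => h, le_refl _, fun _ _ h => h⟩

theorem PostA_trans {u v w : List (List Bool)} (h1 : PostA u v) (h2 : PostA v w) : PostA u w :=
  ⟨fun N h => h2.1 N (h1.1 N h), le_trans h2.2.1 h1.2.1, fun a b h => h2.2.2 a b (h1.2.2 a b h)⟩

theorem PostA_setT (v : List (List Bool)) (y x : Int) : PostA v (setT v y x) :=
  ⟨fun _ h => RL_setT h y x, cf_setT_le v y x, fun a b h => mono_setT v y x a b h⟩

theorem dfsA_post (maze : List (List Int)) : ∀ fuel : Nat,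
    (∀ v y x, PostA v (dfsA maze fuel v y x).2 ∧
      (∀ r, (dfsA maze fuel v y x).1 = some r → 1 ≤ r)) ∧
    (∀ n v y x is, PostA v (dfsAloop maze fuel n v y x is).2 ∧
      (∀ r, (dfsAloop maze fuel n v y x is).1 = some r → 1 ≤ r)) := by
  intro fuel
  induction fuel with
  | zero =>
    constructor
    · intro v y x
      simp [dfsA, PostA_refl]
    · intro n v y x is
      induction is generalizing v with
      | nil => simp [dfsAloop, PostA_refl]
      | cons i rest ih =>
        simp only [dfsAloop]
        split_ifs with hc
        · simp only [dfsA]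
          exact ih v
        · exact ih v
  | succ f ihf =>
    have hP : ∀ v y x, PostA v (dfsA maze (f+1) v y x).2 ∧
        (∀ r, (dfsA maze (f+1) v y x).1 = some r → 1 ≤ r) := by
      intro v y x
      simp only [dfsA]
      split_ifs with hg
      · exact ⟨PostA_setT v y x, by intro r hr; simp at hr; omega⟩
      · have h2 := (ihf.2) (maze.length : Int) (setT v y x) y x (List.range 4)
        exact ⟨PostA_trans (PostA_setT v y x) h2.1, h2.2⟩
    refine ⟨hP, ?_⟩
    intro n v y x is
    induction is generalizing v with
    | nil => simp [dfsAloop, PostA_refl]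
    | cons i rest ih =>
      simp only [dfsAloop]
      split_ifs with hc
      · rcases hA : dfsA maze (f+1) v (y + PySem.List.pyGetD pyDy (i : Int) 0)
          (x + PySem.List.pyGetD pyDx (i : Int) 0) with ⟨ro, v'⟩
        have hda := hP v (y + PySem.List.pyGetD pyDy (i : Int) 0)
          (x + PySem.List.pyGetD pyDx (i : Int) 0)
        rw [hA] at hda
        cases ro with
        | none =>
          simp only
          exact ⟨PostA_trans hda.1 ((ih v').1), (ih v').2⟩
        | some r =>
          simp only
          split_ifs with hr0
          · exact ⟨hda.1, by intro r' hr'; simp at hr'; have := hda.2 r rfl; omega⟩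
          · exact ⟨PostA_trans hda.1 ((ih v').1), (ih v').2⟩
      · exact ih v


-- fuel irrelevance for port A: any two sufficient fuels give the same result
theorem dfsA_irr (maze : List (List Int)) : ∀ k : Nat, ∀ v : List (List Bool), cfV v < k →
    ∀ y x : Int, RL v maze.length → 0 ≤ y → y < (maze.length : Int) → 0 ≤ x → x < (maze.length : Int) →
    getB2 v y x = false → ∀ f g : Nat, cfV v ≤ f → cfV v ≤ g →
    dfsA maze (f+1) v y x = dfsA maze (g+1) v y x := by
  intro k
  induction k using Nat.strong_induction_on with
  | _ k IH =>
    intro v hk y x hRL hy0 hy1 hx0 hx1 hfalse f g hf hg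
    have hAIRR : ∀ w : List (List Bool), cfV w < cfV v → ∀ b c : Int,
        RL w maze.length → 0 ≤ b → b < (maze.length : Int) → 0 ≤ c → c < (maze.length : Int) →
        getB2 w b c = false → ∀ f' g' : Nat, cfV w ≤ f' → cfV w ≤ g' →
        dfsA maze (f'+1) w b c = dfsA maze (g'+1) w b c := by
      intro w hw
      exact IH (cfV v) hk w hw
    simp only [dfsA]
    split_ifs with hg3
    · rfl
    · -- loop irrelevance at v1 := setT v y x
      have hv1RL : RL (setT v y x) maze.length := RL_setT hRL y x
      have hv1cf : cfV (setT v y x) + 1 = cfV v := cf_setT_dec hRL hy0 hy1 hx0 hx1 hfalse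
      have L : ∀ is : List Nat, ∀ v' : List (List Bool), RL v' maze.length →
          cfV v' ≤ cfV (setT v y x) → ∀ f' g' : Nat, cfV v' < f' → cfV v' < g' →
          ∀ a b : Int,
          dfsAloop maze f' (maze.length : Int) v' a b is = dfsAloop maze g' (maze.length : Int) v' a b is := by
        intro is
        induction is with
        | nil => intro v' _ _ f' g' _ _ a b; simp [dfsAloop]
        | cons i rest ihL =>
          intro v' hRL' hcf' f' g' hf' hg' a b
          simp only [dfsAloop]
          split_ifs with hc
          · obtain ⟨⟨hny0, hny1, hnx0, hnx1, hB, hW⟩⟩ : PLift (0 ≤ a + PySem.List.pyGetD pyDy (i : Int) 0 ∧ a + PySem.List.pyGetD pyDy (i : Int) 0 < (maze.length : Int) ∧ 0 ≤ b + PySem.List.pyGetD pyDx (i : Int) 0 ∧ b + PySem.List.pyGetD pyDx (i : Int) 0 < (maze.length : Int) ∧ getB2 v' (a + PySem.List.pyGetD pyDy (i : Int) 0) (b + PySem.List.pyGetD pyDx (i : Int) 0) = false ∧ getI2 maze (a + PySem.List.pyGetD pyDy (i : Int) 0) (b + PySem.List.pyGetD pyDx (i : Int) 0) ≠ 1) :=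 ⟨by tauto⟩
            obtain ⟨f'', rfl⟩ : ∃ f'', f' = f'' + 1 := ⟨f' - 1, by omega⟩
            obtain ⟨g'', rfl⟩ : ∃ g'', g' = g'' + 1 := ⟨g' - 1, by omega⟩
            have heq := hAIRR v' (by omega) _ _ hRL' hny0 hny1 hnx0 hnx1 hB f'' g'' (by omega) (by omega)
            rw [← heq]
            rcases hA : dfsA maze (f''+1) v' (a + PySem.List.pyGetD pyDy (i : Int) 0) (b + PySem.List.pyGetD pyDx (i : Int) 0) with ⟨ro, v''⟩
            have hpost := ((dfsA_post maze (f''+1)).1 v' (a + PySem.List.pyGetD pyDy (i : Int) 0) (b + PySem.List.pyGetD pyDx (i : Int) 0))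
            rw [hA] at hpost
            have hRL'' : RL v'' maze.length := hpost.1.1 _ hRL'
            have hcf'' : cfV v'' ≤ cfV v' := hpost.1.2.1
            cases ro with
            | none =>
              simp only
              exact ihL v'' hRL'' (le_trans hcf'' hcf') _ _ (by omega) (by omega) a b
            | some r =>
              simp only
              split_ifs with hr0
              · rfl
              · exact ihL v'' hRL'' (le_trans hcf'' hcf') _ _ (by omega) (by omega) a b
          · exact ihL v' hRL' hcf' _ _ hf' hg' a b
      exact L (List.range 4) (setT v y x) hv1RL (le_refl _) f g (by omega) (by omega) y x


def OkSt (N : Nat) (s : List (Int × Int × Int)) : Prop :=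
  ∀ p ∈ s, 0 ≤ p.1 ∧ p.1 < (N : Int) ∧ 0 ≤ p.2.1 ∧ p.2.1 < (N : Int)

theorem OkSt_nbrs (maze : List (List Int)) (v : List (List Bool)) (N : Nat) (y x d : Int) :
    OkSt N (nbrsB maze v (N : Int) y x d) := by
  intro p hp
  unfold nbrsB at hp
  rcases List.mem_filterMap.mp hp with ⟨i, _, hfi⟩
  dsimp only at hfi
  split_ifs at hfi with hc
  cases hfi
  exact ⟨hc.1, hc.2.1, hc.2.2.1, hc.2.2.2.1⟩

theorem OkSt_append {N : Nat} {s t : List (Int × Int × Int)} (h1 : OkSt N s) (h2 : OkSt N t) :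
    OkSt N (s ++ t) := by
  intro p hp
  rcases List.mem_append.mp hp with h | h
  · exact h1 p h
  · exact h2 p h

theorem len_nbrs_le (maze : List (List Int)) (v : List (List Bool)) (n y x d : Int) :
    (nbrsB maze v n y x d).length ≤ 4 := by
  have := List.length_filterMap_le (fun i =>
    let ny := y + PySem.List.pyGetD pyDy (i : Int) 0
    let nx := x + PySem.List.pyGetD pyDx (i : Int) 0
    if 0 ≤ ny ∧ ny < n ∧ 0 ≤ nx ∧ nx < n ∧ getB2 v ny nx = false ∧ getI2 maze ny nx ≠ 1 then
      some (ny, nx, d)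
    else none) (List.range 4)
  simpa [nbrsB] using this

-- fuel irrelevance for port B's loop
theorem loopB_irr (maze : List (List Int)) : ∀ k : Nat, ∀ (v : List (List Bool)) (s : List (Int × Int × Int)),
    4 * cfV v + s.length < k → RL v maze.length → OkSt maze.length s →
    ∀ f g : Nat, 4 * cfV v + s.length < f → 4 * cfV v + s.length < g →
    loopB maze f v s = loopB maze g v s := by
  intro k
  induction k using Nat.strong_induction_on with
  | _ k IH =>
    intro v s hk hRL hOk f g hf hg
    cases s with
    | nil => cases f <;> cases g <;> simp [loopB]
    | cons p rest =>
      rcases p with ⟨cy, cx, d⟩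
      obtain ⟨f', rfl⟩ : ∃ f', f = f' + 1 := ⟨f - 1, by omega⟩
      obtain ⟨g', rfl⟩ : ∃ g', g = g' + 1 := ⟨g - 1, by omega⟩
      have hOkrest : OkSt maze.length rest := fun q hq => hOk q (List.mem_cons_of_mem _ hq)
      have hhead := hOk (cy, cx, d) List.mem_cons_self
      simp only [loopB]
      split_ifs with hvis hg3
      · exact IH (k-1) (by omega) v rest (by simp at hk ⊢; omega) hRL hOkrest f' g'
          (by simp at hf ⊢; omega) (by simp at hg ⊢; omega)
      · rfl
      · have hcf : cfV (setT v cy cx) + 1 = cfV v :=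
          cf_setT_dec hRL hhead.1 hhead.2.1 hhead.2.2.1 hhead.2.2.2 (by simpa using hvis)
        have hRL1 : RL (setT v cy cx) maze.length := RL_setT hRL cy cx
        have hlen := len_nbrs_le maze (setT v cy cx) (maze.length : Int) cy cx (d+1)
        have hOk1 : OkSt maze.length
            (nbrsB maze (setT v cy cx) (maze.length : Int) cy cx (d+1) ++ rest) :=
          OkSt_append (OkSt_nbrs maze (setT v cy cx) maze.length cy cx (d+1)) hOkrest
        refine IH (k-1) (by omega) (setT v cy cx) _ ?_ hRL1 hOk1 f' g' ?_ ?_ <;>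
          · simp only [List.length_append, List.length_cons] at hk hf hg ⊢
            omega


theorem dfsAloop_irr (maze : List (List Int)) : ∀ (is : List Nat) (v : List (List Bool)) (y x : Int) (f g : Nat),
    RL v maze.length → cfV v < f → cfV v < g →
    dfsAloop maze f (maze.length : Int) v y x is = dfsAloop maze g (maze.length : Int) v y x is := by
  intro is
  induction is with
  | nil => intro v y x f g _ _ _; simp [dfsAloop]
  | cons i rest ihL =>
    intro v y x f g hRL hf hg
    simp only [dfsAloop]
    split_ifs with hc
    · obtain ⟨hny0, hny1, hnx0, hnx1, hB, hW⟩ := hc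
      obtain ⟨f', rfl⟩ : ∃ f', f = f' + 1 := ⟨f - 1, by omega⟩
      obtain ⟨g', rfl⟩ : ∃ g', g = g' + 1 := ⟨g - 1, by omega⟩
      have heq := dfsA_irr maze (cfV v + 1) v (by omega) _ _ hRL hny0 hny1 hnx0 hnx1 hB f' g' (by omega) (by omega)
      rw [← heq]
      rcases hA : dfsA maze (f'+1) v (y + PySem.List.pyGetD pyDy (i : Int) 0) (x + PySem.List.pyGetD pyDx (i : Int) 0) with ⟨ro, v'⟩
      have hpost := (dfsA_post maze (f'+1)).1 v (y + PySem.List.pyGetD pyDy (i : Int) 0) (x + PySem.List.pyGetD pyDx (i : Int) 0)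
      rw [hA] at hpost
      have hRL' : RL v' maze.length := hpost.1.1 _ hRL
      have hcf' : cfV v' ≤ cfV v := hpost.1.2.1
      cases ro with
      | none => simp only; exact ihL v' y x (f'+1) (g'+1) hRL' (by omega) (by omega)
      | some r =>
        simp only
        split_ifs with hr0
        · rfl
        · exact ihL v' y x (f'+1) (g'+1) hRL' (by omega) (by omega)
    · exact ihL v y x f g hRL hf hg

-- proof-side: the neighbour list restricted to a suffix of directions, and canonical-fuel runs
def nbrsF (maze : List (List Int)) (v : List (List Bool)) (n : Int) (y x d : Int) (is : List Nat) :
    List (Int × Int × Int) :=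
  is.filterMap (fun (i : Nat) =>
    let ny := y + PySem.List.pyGetD pyDy (i : Int) 0
    let nx := x + PySem.List.pyGetD pyDx (i : Int) 0
    if 0 ≤ ny ∧ ny < n ∧ 0 ≤ nx ∧ nx < n ∧ getB2 v ny nx = false ∧ getI2 maze ny nx ≠ 1 then
      some (ny, nx, d)
    else none)

theorem nbrsB_eq_F (maze : List (List Int)) (v : List (List Bool)) (n y x d : Int) :
    nbrsB maze v n y x d = nbrsF maze v n y x d (List.range 4) := rfl

theorem OkSt_nbrsF (maze : List (List Int)) (v : List (List Bool)) (N : Nat) (y x d : Int)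
    (is : List Nat) : OkSt N (nbrsF maze v (N : Int) y x d is) := by
  intro p hp
  unfold nbrsF at hp
  rcases List.mem_filterMap.mp hp with ⟨i, _, hfi⟩
  dsimp only at hfi
  split_ifs at hfi with hc
  cases hfi
  exact ⟨hc.1, hc.2.1, hc.2.2.1, hc.2.2.2.1⟩

theorem nbrsF_cons (maze : List (List Int)) (v : List (List Bool)) (n y x d : Int)
    (i : Nat) (is : List Nat) :
    nbrsF maze v n y x d (i :: is) =
      (if 0 ≤ y + PySem.List.pyGetD pyDy (i : Int) 0 ∧ y + PySem.List.pyGetD pyDy (i : Int) 0 < n ∧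
          0 ≤ x + PySem.List.pyGetD pyDx (i : Int) 0 ∧ x + PySem.List.pyGetD pyDx (i : Int) 0 < n ∧
          getB2 v (y + PySem.List.pyGetD pyDy (i : Int) 0) (x + PySem.List.pyGetD pyDx (i : Int) 0) = false ∧
          getI2 maze (y + PySem.List.pyGetD pyDy (i : Int) 0) (x + PySem.List.pyGetD pyDx (i : Int) 0) ≠ 1 then
        (y + PySem.List.pyGetD pyDy (i : Int) 0, x + PySem.List.pyGetD pyDx (i : Int) 0, d) ::
          nbrsF maze v n y x d is
      else nbrsF maze v n y x d is) := by
  unfold nbrsF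
  rw [List.filterMap_cons]
  dsimp only
  split_ifs with hc <;> rfl

def Brun (maze : List (List Int)) (v : List (List Bool)) (s : List (Int × Int × Int)) : Option Int :=
  loopB maze (4 * cfV v + s.length + 1) v s

def Lrun (maze : List (List Int)) (v : List (List Bool)) (y x : Int) (is : List Nat) :
    Option Int × List (List Bool) :=
  dfsAloop maze (cfV v + 1) (maze.length : Int) v y x is

def Arun (maze : List (List Int)) (v : List (List Bool)) (y x : Int) :
    Option Int × List (List Bool) :=
  dfsA maze (cfV v + 2) v y x


theorem loopB_nil (maze : List (List Int)) (f : Nat) (v : List (List Bool)) :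
    loopB maze f v [] = none := by cases f <;> simp [loopB]

theorem loopB_succ (maze : List (List Int)) (f : Nat) (v : List (List Bool)) (cy cx d : Int)
    (rest : List (Int × Int × Int)) :
    loopB maze (f+1) v ((cy, cx, d) :: rest) =
      if getB2 v cy cx = true then loopB maze f v rest
      else if getI2 maze cy cx = 3 then some d
      else loopB maze f (setT v cy cx)
        (nbrsB maze (setT v cy cx) (maze.length : Int) cy cx (d+1) ++ rest) := by
  simp [loopB]

theorem dfsA_succ (maze : List (List Int)) (f : Nat) (v : List (List Bool)) (y x : Int) :
    dfsA maze (f+1) v y x =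
      if getI2 maze y x = 3 then (some 1, setT v y x)
      else dfsAloop maze f (maze.length : Int) (setT v y x) y x (List.range 4) := by
  simp [dfsA]

theorem dfsAloop_nil (maze : List (List Int)) (f : Nat) (n : Int) (v : List (List Bool)) (y x : Int) :
    dfsAloop maze f n v y x [] = (none, v) := by simp [dfsAloop]

theorem dfsAloop_cons (maze : List (List Int)) (f : Nat) (n : Int) (v : List (List Bool))
    (y x : Int) (i : Nat) (rest : List Nat) :
    dfsAloop maze f n v y x (i :: rest) =
      (if 0 ≤ y + PySem.List.pyGetD pyDy (i : Int) 0 ∧ y + PySem.List.pyGetD pyDy (i : Int) 0 < n ∧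
          0 ≤ x + PySem.List.pyGetD pyDx (i : Int) 0 ∧ x + PySem.List.pyGetD pyDx (i : Int) 0 < n ∧
          getB2 v (y + PySem.List.pyGetD pyDy (i : Int) 0) (x + PySem.List.pyGetD pyDx (i : Int) 0) = false ∧
          getI2 maze (y + PySem.List.pyGetD pyDy (i : Int) 0) (x + PySem.List.pyGetD pyDx (i : Int) 0) ≠ 1 then
        match dfsA maze f v (y + PySem.List.pyGetD pyDy (i : Int) 0) (x + PySem.List.pyGetD pyDx (i : Int) 0) with
        | (some r, v') => if r ≠ 0 then (some (r + 1), v') else dfsAloop maze f n v' y x rest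
        | (none, v') => dfsAloop maze f n v' y x rest
      else dfsAloop maze f n v y x rest) := by
  simp only [dfsAloop]


-- the simulation: B's stack loop, holding the neighbours of a node filtered at push time (state v1)
-- plus a residual stack, against A's direction loop running in the current state v
theorem equivLoop (maze : List (List Int)) : ∀ k : Nat, ∀ v1 : List (List Bool), cfV v1 < k →
    ∀ (is : List Nat) (v : List (List Bool)) (y x d : Int) (rest : List (Int × Int × Int)),
    RL v maze.length → MonoV v1 v → cfV v ≤ cfV v1 → OkSt maze.length rest →
    Brun maze v (nbrsF maze v1 (maze.length : Int) y x (d+1) is ++ rest) =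
      (match Lrun maze v y x is with
       | (some r, _) => some (d - 1 + r)
       | (none, v') => Brun maze v' rest) := by
  intro k
  induction k using Nat.strong_induction_on with
  | _ k IHk =>
    intro v1 hk
    have MAIN : ∀ (w : List (List Bool)) (a b e : Int) (rest' : List (Int × Int × Int)),
        RL w maze.length → cfV w ≤ cfV v1 → 0 ≤ a → a < (maze.length : Int) → 0 ≤ b →
        b < (maze.length : Int) → getB2 w a b = false → OkSt maze.length rest' →
        Brun maze w ((a, b, e) :: rest') =
          (match Arun maze w a b with
           | (some r, _) => some (e - 1 + r)
           | (none, w') => Brun maze w' rest') := by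
      intro w a b e rest' hRLw hcfw ha0 ha1 hb0 hb1 hfalse hOk'
      have hcfm : cfV (setT w a b) + 1 = cfV w := cf_setT_dec hRLw ha0 ha1 hb0 hb1 hfalse
      have hRLm : RL (setT w a b) maze.length := RL_setT hRLw a b
      have e1 : 4 * cfV w + ((a, b, e) :: rest').length + 1 = (4 * cfV w + rest'.length + 1) + 1 := by
        simp; omega
      rw [Brun, e1, loopB_succ, if_neg (by simp [hfalse]), Arun,
        (by omega : cfV w + 2 = (cfV w + 1) + 1), dfsA_succ]
      by_cases hg3 : getI2 maze a b = 3
      · rw [if_pos hg3, if_pos hg3]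
        have : e - 1 + 1 = e := by omega
        simp [this]
      · rw [if_neg hg3, if_neg hg3]
        have hlen := len_nbrs_le maze (setT w a b) (maze.length : Int) a b (e+1)
        have hOkS : OkSt maze.length
            (nbrsB maze (setT w a b) (maze.length : Int) a b (e+1) ++ rest') :=
          OkSt_append (by rw [nbrsB_eq_F]; exact OkSt_nbrsF maze (setT w a b) maze.length a b (e+1) (List.range 4)) hOk'
        have hirr := loopB_irr maze (4 * cfV (setT w a b) + (nbrsB maze (setT w a b) (maze.length : Int) a b (e+1) ++ rest').length + 2)
          (setT w a b) (nbrsB maze (setT w a b) (maze.length : Int) a b (e+1) ++ rest')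
          (by omega) hRLm hOkS (4 * cfV w + rest'.length + 1)
          (4 * cfV (setT w a b) + (nbrsB maze (setT w a b) (maze.length : Int) a b (e+1) ++ rest').length + 1)
          (by simp only [List.length_append]; omega) (by omega)
        rw [hirr]
        have hL := IHk (k-1) (by omega) (setT w a b) (by omega) (List.range 4) (setT w a b)
          a b e rest' hRLm (fun _ _ h => h) (le_refl _) hOk'
        rw [nbrsB_eq_F]
        rw [Brun] at hL
        rw [hL, Lrun]
        have hloopirr := dfsAloop_irr maze (List.range 4) (setT w a b) a b
          (cfV w + 1) (cfV (setT w a b) + 1) hRLm (by omega) (by omega)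
        rw [hloopirr]
    intro is
    induction is with
    | nil =>
      intro v y x d rest hRL hMono hcf hOk
      simp only [nbrsF, List.filterMap_nil, List.nil_append, Lrun, dfsAloop_nil]
    | cons i tl IHis =>
      intro v y x d rest hRL hMono hcf hOk
      rw [nbrsF_cons, Lrun, dfsAloop_cons]
      set NY := y + PySem.List.pyGetD pyDy (i : Int) 0 with hNY
      set NX := x + PySem.List.pyGetD pyDx (i : Int) 0 with hNX
      by_cases hC1 : 0 ≤ NY ∧ NY < (maze.length : Int) ∧ 0 ≤ NX ∧ NX < (maze.length : Int) ∧
          getB2 v1 NY NX = false ∧ getI2 maze NY NX ≠ 1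
      · rw [if_pos hC1, List.cons_append]
        by_cases hBv : getB2 v NY NX = true
        · have hCv : ¬(0 ≤ NY ∧ NY < (maze.length : Int) ∧ 0 ≤ NX ∧ NX < (maze.length : Int) ∧
              getB2 v NY NX = false ∧ getI2 maze NY NX ≠ 1) := by
            rintro ⟨_, _, _, _, hBf, _⟩
            rw [hBv] at hBf
            cases hBf
          rw [if_neg hCv]
          have e1 : 4 * cfV v + ((NY, NX, d+1) :: (nbrsF maze v1 (maze.length : Int) y x (d+1) tl ++ rest)).length + 1 =
              (4 * cfV v + (nbrsF maze v1 (maze.length : Int) y x (d+1) tl ++ rest).length + 1) + 1 := by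
            simp only [List.length_cons, List.length_append]
            omega
          rw [Brun, e1, loopB_succ, if_pos hBv]
          have hIH := IHis v y x d rest hRL hMono hcf hOk
          rw [Lrun] at hIH
          rw [Brun] at hIH
          exact hIH
        · have hBf : getB2 v NY NX = false := by
            cases h : getB2 v NY NX
            · rfl
            · exact absurd h hBv
          have hCv : 0 ≤ NY ∧ NY < (maze.length : Int) ∧ 0 ≤ NX ∧ NX < (maze.length : Int) ∧
              getB2 v NY NX = false ∧ getI2 maze NY NX ≠ 1 :=
            ⟨hC1.1, hC1.2.1, hC1.2.2.1, hC1.2.2.2.1, hBf, hC1.2.2.2.2.2⟩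
          rw [if_pos hCv]
          have hOkS : OkSt maze.length (nbrsF maze v1 (maze.length : Int) y x (d+1) tl ++ rest) :=
            OkSt_append (OkSt_nbrsF maze v1 maze.length y x (d+1) tl) hOk
          have hMAIN := MAIN v NY NX (d+1) (nbrsF maze v1 (maze.length : Int) y x (d+1) tl ++ rest)
            hRL hcf hC1.1 hC1.2.1 hC1.2.2.1 hC1.2.2.2.1 hBf hOkS
          rw [hMAIN]
          have heq := dfsA_irr maze (cfV v + 1) v (by omega) NY NX hRL hC1.1 hC1.2.1 hC1.2.2.1
            hC1.2.2.2.1 hBf (cfV v) (cfV v + 1) (le_refl _) (by omega)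
          rw [show dfsA maze (cfV v + 1) v NY NX = Arun maze v NY NX from by rw [Arun]; exact heq]
          rcases hA : Arun maze v NY NX with ⟨ro, v'⟩
          have hpost := (dfsA_post maze (cfV v + 2)).1 v NY NX
          rw [show dfsA maze (cfV v + 2) v NY NX = Arun maze v NY NX from rfl, hA] at hpost
          cases ro with
          | some r =>
            simp only
            have hr1 : 1 ≤ r := hpost.2 r rfl
            rw [if_pos (by omega : r ≠ 0)]
            simp only
            congr 1
            omega
          | none =>
            simp only
            have hRL' : RL v' maze.length := hpost.1.1 _ hRL
            have hMono' : MonoV v1 v' := fun a b h => hpost.1.2.2 a b (hMono a b h)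
            have hcf' : cfV v' ≤ cfV v := hpost.1.2.1
            have hIH := IHis v' y x d rest hRL' hMono' (le_trans hcf' hcf) hOk
            rw [Lrun] at hIH
            rw [dfsAloop_irr maze tl v' y x (cfV v + 1) (cfV v' + 1) hRL' (by omega) (by omega)]
            exact hIH
      · rw [if_neg hC1]
        have hCv : ¬(0 ≤ NY ∧ NY < (maze.length : Int) ∧ 0 ≤ NX ∧ NX < (maze.length : Int) ∧
            getB2 v NY NX = false ∧ getI2 maze NY NX ≠ 1) := by
          rintro ⟨h1, h2, h3, h4, hBf, h6⟩
          apply hC1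
          refine ⟨h1, h2, h3, h4, ?_, h6⟩
          cases hB1 : getB2 v1 NY NX
          · rfl
          · exact absurd (hMono NY NX hB1) (by simp [hBf])
        rw [if_neg hCv]
        have hIH := IHis v y x d rest hRL hMono hcf hOk
        rw [Lrun] at hIH
        exact hIH

-- ===== VERDICT (by name: the statement is the Claim_ definition above) =====
theorem dfs_py_spec : Claim_equal_dfs_py := by
  intro maze visited y x _hDom hPre
  unfold Spec_dfs_py
  obtain ⟨hlen, _hmrows, hvrows, hy0, hy1, hx0, hx1⟩ := hPre
  have hRL : RL visited maze.length := ⟨hlen, hvrows⟩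
  have hRL1 : RL (setT visited y x) maze.length := RL_setT hRL y x
  have hcf1 : cfV (setT visited y x) ≤ cfV visited := cf_setT_le visited y x
  unfold dfs_py dfs_py_alt
  dsimp only
  rw [(by omega : cfV visited + 2 = (cfV visited + 1) + 1), dfsA_succ]
  by_cases hg : getI2 maze y x = 3
  · rw [if_pos hg, if_pos hg]
  · rw [if_neg hg, if_neg hg]
    rw [dfsAloop_irr maze (List.range 4) (setT visited y x) y x (cfV visited + 1)
      (cfV (setT visited y x) + 1) hRL1 (by omega) (by omega)]
    have hOknil : OkSt maze.length ([] : List (Int × Int × Int)) := by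
      intro p hp
      cases hp
    have hOkn : OkSt maze.length (nbrsB maze (setT visited y x) (maze.length : Int) y x 2) := by
      rw [nbrsB_eq_F]
      exact OkSt_nbrsF maze (setT visited y x) maze.length y x 2 (List.range 4)
    have hlenn := len_nbrs_le maze (setT visited y x) (maze.length : Int) y x 2
    rw [loopB_irr maze (4 * cfV (setT visited y x) + (nbrsB maze (setT visited y x) (maze.length : Int) y x 2).length + 2)
      (setT visited y x) (nbrsB maze (setT visited y x) (maze.length : Int) y x 2)
      (by omega) hRL1 hOkn (4 * cfV visited + 5)
      (4 * cfV (setT visited y x) + (nbrsB maze (setT visited y x) (maze.length : Int) y x 2).length + 1)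
      (by omega) (by omega)]
    have hL := equivLoop maze (cfV (setT visited y x) + 1) (setT visited y x) (by omega)
      (List.range 4) (setT visited y x) y x 1 [] hRL1 (fun _ _ h => h) (le_refl _) hOknil
    rw [List.append_nil, Brun] at hL
    rw [nbrsB_eq_F]
    rw [show (1 : Int) + 1 = 2 from rfl] at hL
    rw [hL]
    rcases hLr : Lrun maze (setT visited y x) y x (List.range 4) with ⟨ro, v'⟩
    rw [Lrun] at hLr
    rw [hLr]
    cases ro with
    | some r =>
      simp only
      congr 1
      omega
    | none =>
      simp only [Brun, List.length_nil, loopB_nil]
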